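-- pv_equiv track=rewrite | github.com/danieleschmidt/sql-query-synthesizer | sql_synthesizer/intelligence/query_insights.py | _count_subquery_depth
-- ===== SOURCE A (Python) =====
-- def _count_subquery_depth(sql: str) -> int:
--     """Count maximum nesting depth of subqueries."""
--     depth = 0
--     max_depth = 0
--     in_string = False
--     string_char = None
--
--     for i, char in enumerate(sql):
--         # Handle string literals
--         if char in ['"', "'"] and (i == 0 or sql[i-1] != '\\'):
--             if not in_string:
--                 in_string = True
--                 string_char = char
--             elif char == string_char:
--                 in_string = False
--                 string_char = None
--             continue
--
--         if in_string:
--             continue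
--
--         if char == '(':
--             # Check if this is likely a subquery
--             prev_context = sql[max(0, i-20):i].upper()
--             if any(keyword in prev_context for keyword in ['SELECT', 'FROM', 'WHERE', 'HAVING']):
--                 depth += 1
--                 max_depth = max(max_depth, depth)
--         elif char == ')':
--             depth = max(0, depth - 1)
--
--     return max_depth
-- ===== SOURCE B (Python) =====
-- def _count_subquery_depth(sql: str) -> int:
--     """Count maximum nesting depth of subqueries (two-pass: lex to events, then reduce)."""
--     KEYWORDS = ('SELECT', 'FROM', 'WHERE', 'HAVING')
--     # Pass 1: lex the string into an ordered list of paren events, tracking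
--     # string literals with the same quote/escape state machine as the scanner.
--     events = []  # True/False = '(' (subquery-context or not), None = ')'
--     in_string = False
--     string_char = None
--     for i, char in enumerate(sql):
--         if char in ('"', "'") and (i == 0 or sql[i-1] != '\\'):
--             if not in_string:
--                 in_string = True
--                 string_char = char
--             elif char == string_char:
--                 in_string = False
--                 string_char = None
--         elif not in_string:
--             if char == '(':
--                 window = sql[max(0, i-20):i].upper()
--                 events.append(any(k in window for k in KEYWORDS))
--             elif char == ')':
--                 events.append(None)
--     # Pass 2: fold over the event list computing the clamped depth maximum.
--     depth = 0
--     max_depth = 0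
--     for ev in events:
--         if ev is None:
--             depth = max(0, depth - 1)
--         elif ev:
--             depth += 1
--             max_depth = max(max_depth, depth)
--     return max_depth
-- ===== Notes on version B (the rewrite author's own statement) =====
-- stated objective: alternative
-- what changed: B splits A's single stateful scan into two passes: a lexer that emits an ordered list of paren events (subquery-open / plain-open / close) outside string literals, then a separate fold over that event list computing the clamped depth maximum.
import Mathlib
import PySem

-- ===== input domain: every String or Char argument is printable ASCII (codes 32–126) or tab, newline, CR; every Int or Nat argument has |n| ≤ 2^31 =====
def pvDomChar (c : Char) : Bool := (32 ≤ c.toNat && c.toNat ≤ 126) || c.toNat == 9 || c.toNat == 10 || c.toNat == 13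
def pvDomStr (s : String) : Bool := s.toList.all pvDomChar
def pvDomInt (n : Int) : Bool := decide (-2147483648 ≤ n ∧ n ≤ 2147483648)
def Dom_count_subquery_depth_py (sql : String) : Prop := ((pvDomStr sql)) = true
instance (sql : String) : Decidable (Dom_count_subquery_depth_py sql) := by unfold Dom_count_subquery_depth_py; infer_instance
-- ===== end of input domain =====

-- B rewrites A's one stateful scan as two passes (lex to an event list, then a depth fold); same O(n) cost.

-- ===== PORT A =====
-- shared transliterations of expressions that occur verbatim in both Pythons:
-- `char in ['"', "'"] and (i == 0 or sql[i-1] != '\\')`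
def pvQuote (cs : List Char) (i : Int) (c : Char) : Bool :=
  (c == '"' || c == '\'') && (i == 0 || PySem.List.pyGetD cs (i - 1) ' ' != '\\')
-- `any(keyword in sql[max(0, i-20):i].upper() for keyword in ['SELECT','FROM','WHERE','HAVING'])`
def pvKw (cs : List Char) (i : Int) : Bool :=
  let ctx := PySem.Chars.upper (PySem.List.slice cs (some (max 0 (i - 20))) (some i))
  PySem.Chars.isIn "SELECT".toList ctx || PySem.Chars.isIn "FROM".toList ctx ||
    PySem.Chars.isIn "WHERE".toList ctx || PySem.Chars.isIn "HAVING".toList ctx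

def stepA (cs : List Char) (st : Int × Int × Bool × Option Char) (p : Int × Char) :
    Int × Int × Bool × Option Char :=
  let (d, m, ins, sc) := st
  let (i, c) := p
  if pvQuote cs i c then
    if !ins then (d, m, true, some c)
    else if some c == sc then (d, m, false, none)
    else (d, m, ins, sc)
  else if ins then (d, m, ins, sc)
  else if c == '(' then
    if pvKw cs i then (d + 1, max m (d + 1), ins, sc) else (d, m, ins, sc)
  else if c == ')' then (max 0 (d - 1), m, ins, sc)
  else (d, m, ins, sc)

def count_subquery_depth_py (sql : String) : Int :=
  let cs := sql.toList
  ((PySem.List.enumerate cs 0).foldl (stepA cs) (0, 0, false, none)).2.1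

-- ===== PORT B =====
-- pass 1: lex into events: some b = '(' outside a string (b = subquery context), none = ')'
def lexB (cs : List Char) : List (Int × Char) → Bool → Option Char → List (Option Bool)
  | [], _, _ => []
  | (i, c) :: rest, ins, sc =>
    if pvQuote cs i c then
      if !ins then lexB cs rest true (some c)
      else if some c == sc then lexB cs rest false none
      else lexB cs rest ins sc
    else if ins then lexB cs rest ins sc
    else if c == '(' then some (pvKw cs i) :: lexB cs rest ins sc
    else if c == ')' then none :: lexB cs rest ins sc
    else lexB cs rest ins sc

-- pass 2: fold the event list into the clamped maximum depth
def reduceB : List (Option Bool) → Int → Int → Int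
  | [], _, m => m
  | none :: es, d, m => reduceB es (max 0 (d - 1)) m
  | some b :: es, d, m => if b then reduceB es (d + 1) (max m (d + 1)) else reduceB es d m

def count_subquery_depth_py_alt (sql : String) : Int :=
  let cs := sql.toList
  reduceB (lexB cs (PySem.List.enumerate cs 0) false none) 0 0

-- ===== PRECONDITION & SPEC =====
def Spec_count_subquery_depth_py (sql : String) (out : Int) : Prop := out = count_subquery_depth_py_alt sql
instance (sql : String) (out : Int) : Decidable (Spec_count_subquery_depth_py sql out) := by unfold Spec_count_subquery_depth_py; infer_instance

-- ===== CLAIM (what is proved, stated in full; the proofs are below) =====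
def Claim_equal_count_subquery_depth_py : Prop := ∀ (sql : String), Dom_count_subquery_depth_py sql → Spec_count_subquery_depth_py sql (count_subquery_depth_py sql)

-- ===== LEMMAS AND PROOFS =====
theorem foldA_eq_reduce_lex (cs : List Char) (l : List (Int × Char)) :
    ∀ (d m : Int) (ins : Bool) (sc : Option Char),
      (l.foldl (stepA cs) (d, m, ins, sc)).2.1 = reduceB (lexB cs l ins sc) d m := by
  induction l with
  | nil => intro d m ins sc; simp [lexB, reduceB]
  | cons p rest ih =>
    intro d m ins sc
    obtain ⟨i, c⟩ := p
    simp only [List.foldl_cons, stepA, lexB]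
    split_ifs <;> simp_all [reduceB]

-- ===== VERDICT (by name: the statement is the Claim_ definition above) =====
theorem count_subquery_depth_py_spec : Claim_equal_count_subquery_depth_py := by
  intro sql _
  unfold Spec_count_subquery_depth_py count_subquery_depth_py count_subquery_depth_py_alt
  exact foldA_eq_reduce_lex sql.toList (PySem.List.enumerate sql.toList 0) 0 0 false none
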